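-- pv_equiv track=rewrite | github.com/stevendejongnl/advent-of-code | 2022/03/day_three.py | shared_item
-- ===== SOURCE A (Python) =====
-- def shared_item(rucksack):
--     first_compartment, second_compartment = rucksack
--     first = [*first_compartment]
--     second = [*second_compartment]
--     in_both_compartments = ''
--     for item in first:
--         if item in second:
--             in_both_compartments = item
--
--     return in_both_compartments
-- ===== SOURCE B (Python) =====
-- def shared_item(rucksack):
--     first_compartment, second_compartment = rucksack
--     for item in reversed(first_compartment):
--         if item in second_compartment:
--             return item
--     return ''
-- ===== Notes on version B (the rewrite author's own statement) =====
-- stated objective: simpler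
-- what changed: Replaces the full forward scan with a last-write-wins accumulator by a reverse scan that returns immediately at the first item also present in the second compartment.
import Mathlib
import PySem

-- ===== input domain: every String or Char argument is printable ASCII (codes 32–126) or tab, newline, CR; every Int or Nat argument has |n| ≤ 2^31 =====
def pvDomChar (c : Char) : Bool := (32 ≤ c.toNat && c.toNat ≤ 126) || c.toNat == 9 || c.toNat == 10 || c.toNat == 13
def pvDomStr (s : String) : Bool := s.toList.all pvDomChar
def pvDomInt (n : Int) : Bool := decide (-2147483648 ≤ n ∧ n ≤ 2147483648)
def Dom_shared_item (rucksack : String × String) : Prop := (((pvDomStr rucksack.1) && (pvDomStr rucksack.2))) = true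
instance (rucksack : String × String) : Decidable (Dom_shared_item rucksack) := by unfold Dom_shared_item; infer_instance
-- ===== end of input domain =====

-- B replaces the forward scan with a last-write-wins accumulator by a reverse
-- scan that returns at the first shared item (simpler decomposition, same result).


-- ===== PORT A =====
-- forward fold over the first compartment, overwriting the accumulator on each hit
def shared_item (rucksack : String × String) : String :=
  rucksack.1.toList.foldl
    (fun acc item => if rucksack.2.toList.contains item then String.ofList [item] else acc) ""

-- ===== PORT B =====
-- reverse scan with early return at the first shared item
def sharedRevGo (second : List Char) : List Char → String
  | [] => ""
  | item :: rest => if second.contains item then String.ofList [item] else sharedRevGo second rest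

def shared_item_alt (rucksack : String × String) : String :=
  sharedRevGo rucksack.2.toList rucksack.1.toList.reverse

-- ===== PRECONDITION & SPEC =====
def Spec_shared_item (rucksack : String × String) (out : String) : Prop := out = shared_item_alt rucksack
instance (rucksack : String × String) (out : String) : Decidable (Spec_shared_item rucksack out) := by unfold Spec_shared_item; infer_instance

-- ===== CLAIM (what is proved, stated in full; the proofs are below) =====
def Claim_equal_shared_item : Prop := ∀ (rucksack : String × String), Dom_shared_item rucksack → Spec_shared_item rucksack (shared_item rucksack)

-- ===== LEMMAS AND PROOFS =====

-- the reverse scan is find?-of-the-reverse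
theorem sharedRevGo_eq_find? (second : List Char) (l : List Char) :
    sharedRevGo second l = match l.find? (fun c => second.contains c) with
      | some c => String.ofList [c]
      | none => "" := by
  induction l with
  | nil => rfl
  | cons c rest ih =>
    simp only [sharedRevGo, List.find?]
    by_cases h : c ∈ second
    · simp [h]
    · simp [h, ih]

-- the forward fold keeps the LAST hit, i.e. the first hit of the reversed list
theorem foldl_eq_find?_reverse (second : List Char) (l : List Char) (acc : String) :
    l.foldl (fun acc item => if second.contains item then String.ofList [item] else acc) acc
      = match l.reverse.find? (fun c => second.contains c) with
        | some c => String.ofList [c]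
        | none => acc := by
  induction l generalizing acc with
  | nil => rfl
  | cons c rest ih =>
    simp only [List.foldl, List.reverse_cons, List.find?_append]
    rw [ih]
    cases h : rest.reverse.find? (fun c => second.contains c) with
    | some d => simp
    | none =>
      simp only [Option.none_or]
      by_cases hc : c ∈ second
      · simp [List.find?, hc]
      · simp [List.find?, hc]

-- ===== VERDICT (by name: the statement is the Claim_ definition above) =====
theorem shared_item_spec : Claim_equal_shared_item := by
  intro r _
  show shared_item r = shared_item_alt r
  rw [shared_item, shared_item_alt, sharedRevGo_eq_find?, foldl_eq_find?_reverse]
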